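-- pv_equiv track=rewrite | github.com/ViniciusHenriqueB/Estrutura-de-Dados | revisao-p1/a.py | passouNoDoce
-- ===== SOURCE A (Python) =====
-- def passouNoDoce(string):
--     coordenadas = [0, 0]
--     for instrucao in string:
--         if instrucao == 'U':
--             coordenadas[1] += 1
--         elif instrucao == 'R':
--             coordenadas[0] += 1
--         elif instrucao == 'D':
--             coordenadas[1] -= 1
--         else:
--             coordenadas[0] -= 1
--
--         if coordenadas == [1, 1]:
--             return 'YES'
--     return 'NO'
-- ===== SOURCE B (Python) =====
-- def passouNoDoce(string):
--     # Counting algorithm: the position after k moves is determined by the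
--     # letter counts of the first k characters alone:
--     #   x = (#R) - (#chars that are none of U/R/D),  y = (#U) - (#D).
--     # So instead of simulating the walk, test each prefix length k directly
--     # against that closed form.
--     for k in range(1, len(string) + 1):
--         p = string[:k]
--         u = sum(c == 'U' for c in p)
--         r = sum(c == 'R' for c in p)
--         d = sum(c == 'D' for c in p)
--         if r - (k - u - r - d) == 1 and u - d == 1:
--             return 'YES'
--     return 'NO'
-- ===== Notes on version B (the rewrite author's own statement) =====
-- stated objective: alternative
-- what changed: Replaced A's stateful walk simulation (a mutable coordinate pair updated per character) by a counting algorithm: for each prefix length k it recomputes the letter counts of string[:k] and tests the closed form (x,y) = (#R - #other, #U - #D) against (1,1), maintaining no position state at all.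
import Mathlib
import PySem

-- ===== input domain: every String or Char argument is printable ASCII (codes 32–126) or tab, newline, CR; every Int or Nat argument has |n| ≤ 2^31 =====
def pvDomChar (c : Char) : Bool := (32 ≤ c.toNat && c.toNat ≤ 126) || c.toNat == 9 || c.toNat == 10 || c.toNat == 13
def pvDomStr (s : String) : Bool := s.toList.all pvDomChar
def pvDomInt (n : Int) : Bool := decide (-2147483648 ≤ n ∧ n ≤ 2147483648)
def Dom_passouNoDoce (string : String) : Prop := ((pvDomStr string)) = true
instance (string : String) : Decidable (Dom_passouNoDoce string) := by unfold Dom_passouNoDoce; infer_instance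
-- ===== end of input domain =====

-- B replaces A's stateful walk simulation by a per-prefix counting algorithm:
-- it tests each prefix length against the closed form (#R - #other, #U - #D) = (1,1).

-- ===== PORT A =====
-- A's for-loop: the state is the coordinate pair; early return "YES" when it equals (1,1)
def pvALoop : List Char → Int × Int → String
  | [], _ => "NO"
  | c :: rest, (x, y) =>
      let p : Int × Int :=
        if c = 'U' then (x, y + 1)
        else if c = 'R' then (x + 1, y)
        else if c = 'D' then (x, y - 1)
        else (x - 1, y)
      if p = (1, 1) then "YES" else pvALoop rest p

def passouNoDoce (string : String) : String :=
  pvALoop string.toList (0, 0)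

-- ===== PORT B =====
-- the test of Source B's loop body: counts of string[:k] against the closed form
def pvTest (cs : List Char) (k : Int) : Bool :=
  let p := PySem.List.slice cs none (some k)
  let u : Int := (p.count 'U' : Int)
  let r : Int := (p.count 'R' : Int)
  let d : Int := (p.count 'D' : Int)
  (r - (k - u - r - d) == 1) && (u - d == 1)

-- Source B's for-loop over the prefix lengths k
def pvBLoop (cs : List Char) : List Int → String
  | [] => "NO"
  | k :: ks => if pvTest cs k then "YES" else pvBLoop cs ks

def passouNoDoce_alt (string : String) : String :=
  pvBLoop string.toList (PySem.List.pyRange 1 ((string.toList.length : Int) + 1) 1)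

-- ===== PRECONDITION & SPEC =====
def Spec_passouNoDoce (string : String) (out : String) : Prop := out = passouNoDoce_alt string
instance (string : String) (out : String) : Decidable (Spec_passouNoDoce string out) := by unfold Spec_passouNoDoce; infer_instance

-- ===== CLAIM (what is proved, stated in full; the proofs are below) =====
def Claim_equal_passouNoDoce : Prop := ∀ (string : String), Dom_passouNoDoce string → Spec_passouNoDoce string (passouNoDoce string)

-- ===== LEMMAS AND PROOFS =====

-- proof-side: one step of A's walk
def pvStep : Int × Int → Char → Int × Int
  | (x, y), c =>
      if c = 'U' then (x, y + 1)
      else if c = 'R' then (x + 1, y)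
      else if c = 'D' then (x, y - 1)
      else (x - 1, y)

-- the position after walking l from (x, y) is the counting closed form
theorem pvFold_counts (l : List Char) (x y : Int) :
    l.foldl pvStep (x, y) =
      (x + (l.count 'R' : Int) - ((l.length : Int) - l.count 'U' - l.count 'R' - l.count 'D'),
       y + (l.count 'U' : Int) - l.count 'D') := by
  induction l generalizing x y with
  | nil => simp
  | cons c rest ih =>
      simp only [List.foldl_cons, pvStep, List.count_cons, List.length_cons]
      by_cases h1 : c = 'U'
      · subst h1; rw [if_pos rfl, ih]; simp; omega
      by_cases h2 : c = 'R'
      · subst h2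
        rw [if_neg h1, if_pos rfl, ih]
        have e1 : ('R' == 'U') = false := by decide
        have e3 : ('R' == 'D') = false := by decide
        simp [e1, e3]; omega
      by_cases h3 : c = 'D'
      · subst h3
        rw [if_neg h1, if_neg h2, if_pos rfl, ih]
        have e1 : ('D' == 'U') = false := by decide
        have e2 : ('D' == 'R') = false := by decide
        simp [e1, e2]; omega
      · rw [if_neg h1, if_neg h2, if_neg h3, ih]
        have e1 : (c == 'U') = false := by simpa using h1
        have e2 : (c == 'R') = false := by simpa using h2
        have e3 : (c == 'D') = false := by simpa using h3
        simp [e1, e2, e3]; omega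

-- A's loop answers "YES" iff some nonempty prefix of the walk lands on (1,1)
theorem pvALoop_yes_iff (cs : List Char) (p : Int × Int) :
    pvALoop cs p = "YES" ↔ ∃ k : Nat, k < cs.length ∧ (cs.take (k + 1)).foldl pvStep p = (1, 1) := by
  induction cs generalizing p with
  | nil => simp [pvALoop]
  | cons c rest ih =>
      obtain ⟨x, y⟩ := p
      have hstep : pvALoop (c :: rest) (x, y)
          = if pvStep (x, y) c = (1, 1) then "YES" else pvALoop rest (pvStep (x, y) c) := by
        simp only [pvALoop, pvStep]
      rw [hstep]
      by_cases hq : pvStep (x, y) c = (1, 1)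
      · simp only [if_pos hq]
        constructor
        · intro _; exact ⟨0, by simp, by simpa using hq⟩
        · intro _; trivial
      · simp only [if_neg hq, ih]
        constructor
        · rintro ⟨k, hk, hf⟩
          exact ⟨k + 1, by simpa using Nat.succ_lt_succ hk, by simpa using hf⟩
        · rintro ⟨k, hk, hf⟩
          cases k with
          | zero => exact absurd (by simpa using hf) hq
          | succ k' =>
              exact ⟨k', by simp only [List.length_cons] at hk; omega, by simpa using hf⟩

-- B's loop answers "YES" iff some admitted k passes the counting test
theorem pvBLoop_yes_iff (cs : List Char) (ks : List Int) :
    pvBLoop cs ks = "YES" ↔ ∃ k ∈ ks, pvTest cs k = true := by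
  induction ks with
  | nil => simp [pvBLoop]
  | cons k ks ih =>
      simp only [pvBLoop]
      by_cases h : pvTest cs k = true
      · simp [h]
      · simp [h, ih]

-- for 1 ≤ k ≤ len, the counting test is exactly "the walk is at (1,1) after k steps"
theorem pvTest_iff (cs : List Char) (k : Int) (h1 : 1 ≤ k) (h2 : k ≤ (cs.length : Int)) :
    pvTest cs k = true ↔ (cs.take k.toNat).foldl pvStep (0, 0) = (1, 1) := by
  have hk0 : (0 : Int) ≤ k := by omega
  have hsl : PySem.List.slice cs none (some k) = cs.take k.toNat :=
    PySem.List.slice_to cs hk0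
  have hlen : (cs.take k.toNat).length = k.toNat := by
    simp; omega
  have hkc : ((k.toNat : Nat) : Int) = k := Int.toNat_of_nonneg hk0
  rw [pvFold_counts]
  simp only [pvTest, hsl, hlen, hkc, Prod.mk.injEq, Bool.and_eq_true, beq_iff_eq]
  constructor
  · rintro ⟨ha, hb⟩; constructor <;> omega
  · rintro ⟨ha, hb⟩; constructor <;> omega

-- both loops only ever return "YES" or "NO"
theorem pvALoop_cases (cs : List Char) (p : Int × Int) :
    pvALoop cs p = "YES" ∨ pvALoop cs p = "NO" := by
  induction cs generalizing p with
  | nil => right; rfl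
  | cons c rest ih =>
      obtain ⟨x, y⟩ := p
      simp only [pvALoop]
      split_ifs <;> first | (left; rfl) | apply ih

theorem pvBLoop_cases (cs : List Char) (ks : List Int) :
    pvBLoop cs ks = "YES" ∨ pvBLoop cs ks = "NO" := by
  induction ks with
  | nil => right; rfl
  | cons k ks ih =>
      simp only [pvBLoop]
      split_ifs
      · left; rfl
      · exact ih

-- ===== VERDICT (by name: the statement is the Claim_ definition above) =====
theorem passouNoDoce_spec : Claim_equal_passouNoDoce := by
  intro s _
  unfold Spec_passouNoDoce passouNoDoce passouNoDoce_alt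
  set cs := s.toList with hcs
  have hyes : pvALoop cs (0, 0) = "YES" ↔
      pvBLoop cs (PySem.List.pyRange 1 ((cs.length : Int) + 1) 1) = "YES" := by
    rw [pvALoop_yes_iff, pvBLoop_yes_iff]
    constructor
    · rintro ⟨k, hk, hf⟩
      refine ⟨(k : Int) + 1, ?_, ?_⟩
      · rw [PySem.List.mem_pyRange_one]; constructor <;> omega
      · rw [pvTest_iff cs ((k : Int) + 1) (by omega) (by exact_mod_cast by omega)]
        have : ((k : Int) + 1).toNat = k + 1 := by omega
        rw [this]; exact hf
    · rintro ⟨k, hkmem, ht⟩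
      rw [PySem.List.mem_pyRange_one] at hkmem
      obtain ⟨hk1, hk2⟩ := hkmem
      rw [pvTest_iff cs k hk1 (by omega)] at ht
      refine ⟨k.toNat - 1, by omega, ?_⟩
      have : k.toNat - 1 + 1 = k.toNat := by omega
      rw [this]; exact ht
  rcases pvALoop_cases cs (0, 0) with hA | hA <;>
    rcases pvBLoop_cases cs (PySem.List.pyRange 1 ((cs.length : Int) + 1) 1) with hB | hB
  · rw [hA, hB]
  · exact absurd (hyes.1 hA) (by simp [hB])
  · exact absurd (hyes.2 hB) (by simp [hA])
  · rw [hA, hB]
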